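-- pv_equiv track=rewrite | github.com/szerrade-uw/Stomata-Counter- | archive2dataset.py | leaves_to_list
-- ===== SOURCE A (Python) =====
-- def leaves_to_list(leaves, family_indices):
--     # Collect list of (name, class_index) pairs
--     # Pre-allocate list
--     n = 0
--     for leaves_f in leaves.values():
--         n += len(leaves_f)
--     leaves_list = [None] * n
--     i = 0
--     # Fill it
--     for family, leaves_f in leaves.items():
--         family_index = family_indices[family]
--         for entry in leaves_f:
--             if ' ' in entry or '?' in entry:
--                 print ('WARNING: %s has a space or question mark.' % entry)
--             leaves_list[i] = (entry, family_index)
--             i += 1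
--     return leaves_list
-- ===== SOURCE B (Python) =====
-- def leaves_to_list(leaves, family_indices):
--     # Recursive-descent decomposition: one recursion over the families, one
--     # recursion over each family's entries, building the result by cons/append
--     # instead of A's count/preallocate/index-fill loops.
--     def fam(entries, idx):
--         if not entries:
--             return []
--         entry = entries[0]
--         if ' ' in entry or '?' in entry:
--             print ('WARNING: %s has a space or question mark.' % entry)
--         return [(entry, idx)] + fam(entries[1:], idx)
--
--     def go(items):
--         if not items:
--             return []
--         (family, leaves_f) = items[0]
--         return fam(leaves_f, family_indices[family]) + go(items[1:])
--
--     return go(list(leaves.items()))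
-- ===== Notes on version B (the rewrite author's own statement) =====
-- stated objective: alternative
-- what changed: Replaces A's imperative count/preallocate/manual-index fill with a pure recursive descent: structural recursion over families and over each family's entries, building the list by cons and append; no counting pass, no [None]*n buffer, no running index.
import Mathlib
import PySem

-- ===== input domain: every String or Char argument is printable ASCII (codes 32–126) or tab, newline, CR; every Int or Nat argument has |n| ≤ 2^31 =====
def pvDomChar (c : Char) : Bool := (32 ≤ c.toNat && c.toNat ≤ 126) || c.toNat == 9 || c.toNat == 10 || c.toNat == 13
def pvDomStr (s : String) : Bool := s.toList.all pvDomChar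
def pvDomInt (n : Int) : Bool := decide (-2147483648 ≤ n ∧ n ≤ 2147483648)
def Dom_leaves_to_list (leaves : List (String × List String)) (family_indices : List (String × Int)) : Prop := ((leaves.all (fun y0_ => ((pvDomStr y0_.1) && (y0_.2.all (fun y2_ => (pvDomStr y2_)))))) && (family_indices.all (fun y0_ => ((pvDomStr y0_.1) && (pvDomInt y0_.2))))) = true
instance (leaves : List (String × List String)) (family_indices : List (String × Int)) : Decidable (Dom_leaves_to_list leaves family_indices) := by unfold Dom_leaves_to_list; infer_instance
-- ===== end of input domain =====

-- ===== PORT A =====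
-- B is a pure recursive descent over the structure; A counts, preallocates and index-fills.
-- Return-value equivalence only (the WARNING prints are side effects, not values).
-- A: count total, preallocate [None]*n, fill by running index i; the final filterMap strips
-- the Option layer of the [None]*n buffer (transliteration artifact).
def leaves_to_list (leaves : List (String × List String)) (family_indices : List (String × Int)) : List (String × Int) :=
  let n : Nat := leaves.foldl (fun a p => a + p.2.length) 0
  let init : List (Option (String × Int)) := List.replicate n none
  let st :=
    leaves.foldl
      (fun (st : List (Option (String × Int)) × Nat) p =>
        -- family_index = family_indices[family]; Pre_ guarantees the key is present (KeyError excluded)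
        let family_index : Int := ((PySem.Dict.mk family_indices).get? p.1).getD 0
        p.2.foldl (fun st entry => (st.1.set st.2 (some (entry, family_index)), st.2 + 1)) st)
      (init, 0)
  st.1.filterMap id

-- ===== PORT B =====
-- fam: recursion over one family's entries, consing (entry, idx) pairs
def pvFam (entries : List String) (idx : Int) : List (String × Int) :=
  match entries with
  | [] => []
  | entry :: rest => (entry, idx) :: pvFam rest idx

-- go: recursion over the families, appending each family's block
def pvGo (items : List (String × List String)) (family_indices : List (String × Int)) : List (String × Int) :=
  match items with
  | [] => []
  | p :: rest => pvFam p.2 (((PySem.Dict.mk family_indices).get? p.1).getD 0) ++ pvGo rest family_indices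

def leaves_to_list_alt (leaves : List (String × List String)) (family_indices : List (String × Int)) : List (String × Int) :=
  pvGo leaves family_indices

-- ===== PRECONDITION & SPEC =====
-- Pre_ excludes exactly the inputs where Python A raises KeyError: a family of `leaves` missing from `family_indices` (B raises there too).
def Pre_leaves_to_list (leaves : List (String × List String)) (family_indices : List (String × Int)) : Prop :=
  ∀ p ∈ leaves, p.1 ∈ family_indices.map Prod.fst
instance (leaves : List (String × List String)) (family_indices : List (String × Int)) : Decidable (Pre_leaves_to_list leaves family_indices) := by unfold Pre_leaves_to_list; infer_instance
def pvWitness_leaves_to_list : (List (String × List String)) × (List (String × Int)) :=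
  ([("rosaceae", ["apple", "pear"]), ("fagaceae", ["oak"])], [("rosaceae", 0), ("fagaceae", 1)])
def Spec_leaves_to_list (leaves : List (String × List String)) (family_indices : List (String × Int)) (out : List (String × Int)) : Prop := out = leaves_to_list_alt leaves family_indices
instance (leaves : List (String × List String)) (family_indices : List (String × Int)) (out : List (String × Int)) : Decidable (Spec_leaves_to_list leaves family_indices out) := by unfold Spec_leaves_to_list; infer_instance

-- ===== CLAIM (what is proved, stated in full; the proofs are below) =====
def Claim_equal_leaves_to_list : Prop := ∀ (leaves : List (String × List String)) (family_indices : List (String × Int)), Dom_leaves_to_list leaves family_indices → Pre_leaves_to_list leaves family_indices → Spec_leaves_to_list leaves family_indices (leaves_to_list leaves family_indices)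

-- ===== LEMMAS AND PROOFS =====

theorem pvFam_eq_map (entries : List String) (idx : Int) :
    pvFam entries idx = entries.map (fun e => (e, idx)) := by
  induction entries with
  | nil => rfl
  | cons e t ih => simp [pvFam, ih]

-- the total length A pre-allocates
theorem pv_count (leaves : List (String × List String)) (a : Nat) :
    leaves.foldl (fun a p => a + p.2.length) a
      = a + (leaves.map (fun p => p.2.length)).sum := by
  induction leaves generalizing a with
  | nil => simp
  | cons h t ih => simp [List.foldl, ih, List.map, List.sum_cons]; omega

-- inner loop: filling entries of one family into the none-buffer
theorem pv_inner (entries : List String) (idx : Int)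
    (done : List (Option (String × Int))) (k : Nat) (hk : entries.length ≤ k) :
    entries.foldl (fun st entry => (st.1.set st.2 (some (entry, idx)), st.2 + 1))
        (done ++ List.replicate k none, done.length)
      = (done ++ entries.map (fun e => some (e, idx)) ++ List.replicate (k - entries.length) none,
         done.length + entries.length) := by
  induction entries generalizing done k with
  | nil => simp
  | cons e t ih =>
    obtain ⟨k', rfl⟩ : ∃ k', k = k' + 1 := ⟨k - 1, by simp at hk; omega⟩
    have hset : (done ++ List.replicate (k' + 1) (none : Option (String × Int))).set done.length (some (e, idx))
        = (done ++ [some (e, idx)]) ++ List.replicate k' none := by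
      rw [List.set_append_right _ _ (le_refl _)]
      simp [List.replicate_succ]
    simp only [List.foldl_cons, hset]
    have := ih (done ++ [some (e, idx)]) k' (by simp at hk ⊢; omega)
    simp only [List.length_append, List.length_cons] at this ⊢
    simp at this ⊢
    rw [this]
    congr 1
    omega

-- outer loop: filling all families equals B's recursive descent
theorem pv_outer (leaves : List (String × List String)) (family_indices : List (String × Int))
    (done : List (Option (String × Int))) :
    leaves.foldl
        (fun (st : List (Option (String × Int)) × Nat) p =>
          let family_index : Int := ((PySem.Dict.mk family_indices).get? p.1).getD 0
          p.2.foldl (fun st entry => (st.1.set st.2 (some (entry, family_index)), st.2 + 1)) st)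
        (done ++ List.replicate ((leaves.map (fun p => p.2.length)).sum) none, done.length)
      = (done ++ (pvGo leaves family_indices).map some,
         done.length + (leaves.map (fun p => p.2.length)).sum) := by
  induction leaves generalizing done with
  | nil => simp [pvGo]
  | cons h t ih =>
    simp only [List.foldl_cons, List.map_cons, List.sum_cons]
    have hinner := pv_inner h.2 (((PySem.Dict.mk family_indices).get? h.1).getD 0)
      done (h.2.length + (t.map (fun p => p.2.length)).sum) (by omega)
    rw [Nat.add_sub_cancel_left] at hinner
    rw [hinner]
    have ihh := ih (done ++ h.2.map (fun e => some (e, ((PySem.Dict.mk family_indices).get? h.1).getD 0)))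
    simp only [List.length_append, List.length_map] at ihh
    rw [List.append_assoc] at ihh ⊢
    rw [ihh]
    simp [pvGo, pvFam_eq_map, List.map_map, Function.comp]
    omega

theorem leaves_to_list_spec : Claim_equal_leaves_to_list := by
  intro leaves family_indices _ _
  unfold Spec_leaves_to_list leaves_to_list leaves_to_list_alt
  have h := pv_outer leaves family_indices []
  simp only [List.nil_append, List.length_nil] at h
  simp only [pv_count, Nat.zero_add, h, List.filterMap_map]
  simp
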